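-- pv_equiv track=rewrite | github.com/K-Boomika/GridProblem | GridProblem.py | getRemaining
-- ===== SOURCE A (Python) =====
-- def getRemaining(grid):
--     used_letters = set()
--
--     for row in grid:
--         for cell in row:
--             if cell != '-':
--                 used_letters.add(cell)
--
--     remaining_letters = set(chr(ord('A') + i) for i in range(25)) - used_letters
--     return remaining_letters
-- ===== SOURCE B (Python) =====
-- def getRemaining(grid):
--     # B: iterate over the 25 candidate letters and keep each one absent from every row
--     # (no used-letter set; rescans the grid per candidate)
--     return {c for c in (chr(ord('A') + i) for i in range(25))
--             if all(c not in row for row in grid)}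
-- ===== Notes on version B (the rewrite author's own statement) =====
-- stated objective: alternative
-- what changed: Instead of collecting the used cells into a set and subtracting it from the candidate alphabet, B iterates over the 25 candidate letters and keeps each one only if it occurs in no row, so no used-letter set is ever built.
import Mathlib
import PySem

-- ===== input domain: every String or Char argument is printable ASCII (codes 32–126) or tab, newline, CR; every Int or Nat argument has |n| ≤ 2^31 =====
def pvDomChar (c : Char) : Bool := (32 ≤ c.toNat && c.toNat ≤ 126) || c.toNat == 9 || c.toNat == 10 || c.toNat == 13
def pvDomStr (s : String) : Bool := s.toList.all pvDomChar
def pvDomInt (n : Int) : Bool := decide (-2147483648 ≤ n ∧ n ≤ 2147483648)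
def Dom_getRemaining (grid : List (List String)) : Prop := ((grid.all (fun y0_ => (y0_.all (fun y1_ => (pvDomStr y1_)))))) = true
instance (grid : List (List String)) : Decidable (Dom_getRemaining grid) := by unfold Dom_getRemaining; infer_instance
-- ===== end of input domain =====

-- B iterates over the 25 candidate letters keeping those absent from every row, instead of
-- building a used-cell set and subtracting it (alternative decomposition, same cost class).


-- ===== PORT A =====
def getRemaining (grid : List (List String)) : List String :=
  let used : PySem.Set String :=
    grid.foldl (fun s row =>
      row.foldl (fun s cell => if cell ≠ "-" then PySem.Set.add s cell else s) s)
      PySem.Set.empty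
  PySem.Set.diff
    (PySem.Set.ofList ((List.range 25).map (fun i => String.ofList [Char.ofNat (65 + i)])))
    used

-- ===== PORT B =====
def getRemaining_alt (grid : List (List String)) : List String :=
  ((List.range 25).map (fun i => String.ofList [Char.ofNat (65 + i)])).filter
    (fun c => grid.all (fun row => !(row.contains c)))

-- ===== PRECONDITION & SPEC =====
def Spec_getRemaining (grid : List (List String)) (out : List String) : Prop := out = getRemaining_alt grid
instance (grid : List (List String)) (out : List String) : Decidable (Spec_getRemaining grid out) := by unfold Spec_getRemaining; infer_instance

-- ===== CLAIM (what is proved, stated in full; the proofs are below) =====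
def Claim_equal_getRemaining : Prop := ∀ (grid : List (List String)), Dom_getRemaining grid → Spec_getRemaining grid (getRemaining grid)

-- ===== LEMMAS AND PROOFS =====

-- membership in the inner fold over one row (if-branches in simp-normal order)
theorem pv_row_mem (row : List String) (s : PySem.Set String) (c : String) :
    c ∈ row.foldl (fun s cell => if cell = "-" then s else PySem.Set.add s cell) s ↔
      c ∈ s ∨ (c ∈ row ∧ c ≠ "-") := by
  induction row generalizing s with
  | nil => simp
  | cons x xs ih =>
    simp only [List.foldl_cons, ih, List.mem_cons]
    split <;> rename_i hx
    · subst hx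
      tauto
    · rw [PySem.Set.mem_add]
      by_cases hcx : c = x
      · subst hcx; simp [hx]
      · tauto

-- membership in the outer fold over the grid
theorem pv_grid_mem (grid : List (List String)) (s : PySem.Set String) (c : String) :
    c ∈ grid.foldl (fun s row =>
        row.foldl (fun s cell => if cell = "-" then s else PySem.Set.add s cell) s) s ↔
      c ∈ s ∨ ∃ row ∈ grid, c ∈ row ∧ c ≠ "-" := by
  induction grid generalizing s with
  | nil => simp
  | cons r rs ih =>
    simp only [List.foldl_cons, ih, pv_row_mem, List.mem_cons]
    constructor
    · rintro ((h | h) | ⟨row, hr, hm⟩)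
      · exact Or.inl h
      · exact Or.inr ⟨r, Or.inl rfl, h⟩
      · exact Or.inr ⟨row, Or.inr hr, hm⟩
    · rintro (h | ⟨row, hr | hr, hm⟩)
      · exact Or.inl (Or.inl h)
      · subst hr; exact Or.inl (Or.inr hm)
      · exact Or.inr ⟨row, hr, hm⟩

theorem pv_cands_nodup : ((List.range 25).map (fun i => String.ofList [Char.ofNat (65 + i)])).Nodup := by
  decide

-- ===== VERDICT (by name: the statement is the Claim_ definition above) =====
theorem getRemaining_spec : Claim_equal_getRemaining := by
  intro grid _
  show getRemaining grid = getRemaining_alt grid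
  unfold getRemaining getRemaining_alt
  rw [PySem.Set.ofList_eq_self_of_nodup _ pv_cands_nodup]
  show List.filter _ _ = List.filter _ _
  apply List.filter_congr
  intro c hc
  have hne : c ≠ "-" := by
    have hall : ∀ x ∈ (List.range 25).map (fun i => String.ofList [Char.ofNat (65 + i)]), x ≠ "-" := by
      decide
    exact hall c hc
  simp only [PySem.Set.contains, PySem.Set.empty, ne_eq, ite_not]
  have key : (c ∈ grid.foldl (fun s row =>
      row.foldl (fun s cell => if cell = "-" then s else PySem.Set.add s cell) s)
      ([] : PySem.Set String)) ↔ ∃ row ∈ grid, c ∈ row := by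
    rw [pv_grid_mem]
    simp [hne]
  simp only [List.contains_eq_mem]
  rw [decide_eq_decide.mpr key, Bool.eq_iff_iff]
  · simp [List.all_eq_true]
  · infer_instance
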